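-- pv_equiv track=rewrite | github.com/BudarinPavel/algorithms | yan_algorithm_training_1/3_F.py | calc_power_of_closeness
-- ===== SOURCE A (Python) =====
-- def calc_power_of_closeness(g1, g2):
--     def get_base(g):
--         base = {}
--         for i in range(len(g) - 1):
--             cur_base = g[i:i + 2]
--             if cur_base not in base:
--                 base[cur_base] = 0
--             base[cur_base] += 1
--         return base
--
--     base1 = get_base(g1)
--     base2 = get_base(g2)
--
--     closeness = 0
--     for base in base1:
--         if base in base2:
--             # closeness += base1[base] * base2[base]
--             closeness += base1[base]
--
--     return closeness
-- ===== SOURCE B (Python) =====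
-- def calc_power_of_closeness(g1, g2):
--     return sum(1 for i in range(len(g1) - 1) if g1[i:i + 2] in g2)
-- ===== Notes on version B (the rewrite author's own statement) =====
-- stated objective: simpler
-- what changed: B builds no dictionaries or sets at all: it is a one-line generator-sum that, for each position of g1, tests whether the two-character slice occurs as a substring of g2 (Python's 'in' search), relying on the fact that g2's bigram multiset keys are exactly g2's length-2 substrings.
import Mathlib
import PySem

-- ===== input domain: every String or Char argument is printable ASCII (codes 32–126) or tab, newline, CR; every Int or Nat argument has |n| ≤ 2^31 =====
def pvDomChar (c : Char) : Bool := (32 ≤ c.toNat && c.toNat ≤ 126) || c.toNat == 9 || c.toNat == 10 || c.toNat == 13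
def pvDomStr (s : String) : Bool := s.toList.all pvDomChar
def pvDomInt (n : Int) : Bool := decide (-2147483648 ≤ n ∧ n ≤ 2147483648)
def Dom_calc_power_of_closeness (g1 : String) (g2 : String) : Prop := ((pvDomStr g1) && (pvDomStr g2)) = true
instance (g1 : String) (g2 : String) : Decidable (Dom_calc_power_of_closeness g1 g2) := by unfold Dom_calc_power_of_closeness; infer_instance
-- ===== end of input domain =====

-- B drops A's two count dictionaries entirely: it sums, over the positions of g1, a direct
-- substring test of the two-character slice against g2 (objective: simpler). Equal on all inputs.

-- ===== PORT A =====
-- get_base: dict bigram -> count, built exactly as A does (conditional insert of 0, then += 1)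
def pvGetBase (g : List Char) : PySem.Dict (List Char) Int :=
  (PySem.List.pyRange 0 ((g.length : Int) - 1) 1).foldl
    (fun base i =>
      let cur := PySem.List.slice g (some i) (some (i + 2))
      let base := if base.contains cur then base else base.insert cur 0
      base.modify cur 0 (· + 1))
    PySem.Dict.empty

def calc_power_of_closeness (g1 : String) (g2 : String) : Int :=
  let base1 := pvGetBase g1.toList
  let base2 := pvGetBase g2.toList
  base1.keys.foldl
    (fun closeness b => if base2.contains b then closeness + base1.getD b 0 else closeness) 0

-- ===== PORT B =====
-- sum(1 for i in range(len(g1) - 1) if g1[i:i + 2] in g2)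
def calc_power_of_closeness_alt (g1 : String) (g2 : String) : Int :=
  ((PySem.List.pyRange 0 ((g1.toList.length : Int) - 1) 1).map
    (fun i =>
      if PySem.Chars.isIn (PySem.List.slice g1.toList (some i) (some (i + 2))) g2.toList
      then (1 : Int) else 0)).sum

-- ===== PRECONDITION & SPEC =====
def Spec_calc_power_of_closeness (g1 : String) (g2 : String) (out : Int) : Prop := out = calc_power_of_closeness_alt g1 g2
instance (g1 : String) (g2 : String) (out : Int) : Decidable (Spec_calc_power_of_closeness g1 g2 out) := by unfold Spec_calc_power_of_closeness; infer_instance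

-- ===== CLAIM (what is proved, stated in full; the proofs are below) =====
def Claim_equal_calc_power_of_closeness : Prop := ∀ (g1 : String) (g2 : String), Dom_calc_power_of_closeness g1 g2 → Spec_calc_power_of_closeness g1 g2 (calc_power_of_closeness g1 g2)

-- ===== LEMMAS AND PROOFS =====

-- the list of bigrams of g, in position order
def pvBigrams (g : List Char) : List (List Char) :=
  (PySem.List.pyRange 0 ((g.length : Int) - 1) 1).map
    (fun i => PySem.List.slice g (some i) (some (i + 2)))

-- A's conditional-insert-then-+=1 step is exactly the Counter step
theorem pvStep_eq_modify (d : PySem.Dict (List Char) Int) (x : List Char) :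
    (if d.contains x then d else d.insert x 0).modify x 0 (· + 1) = d.modify x 0 (· + 1) := by
  cases h : d.contains x with
  | true => simp
  | false =>
      simp only [Bool.false_eq_true, if_false, PySem.Dict.modify,
        PySem.Dict.getD_insert_self, PySem.Dict.insert_insert_self,
        PySem.Dict.getD_of_not_contains d 0 h]

theorem pvGetBase_eq_counter (g : List Char) :
    pvGetBase g = PySem.Dict.counter (pvBigrams g) := by
  unfold pvGetBase pvBigrams
  rw [PySem.Dict.counter_eq_foldl, List.foldl_map]
  exact PySem.List.foldl_congr_mem _ _ _ _ fun d i _ => pvStep_eq_modify d _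

-- every bigram in the list form has the drop/take shape and length 2
theorem pvMem_bigrams_iff (b g : List Char) :
    b ∈ pvBigrams g ↔ ∃ i : Nat, i + 2 ≤ g.length ∧ (g.drop i).take 2 = b := by
  unfold pvBigrams
  simp only [List.mem_map, PySem.List.mem_pyRange_one]
  constructor
  · rintro ⟨i, ⟨h0, h1⟩, rfl⟩
    refine ⟨i.toNat, by omega, ?_⟩
    have : i = ((i.toNat : Nat) : Int) := by omega
    rw [this, show ((i.toNat : Nat) : Int) + 2 = ((i.toNat + 2 : Nat) : Int) by push_cast; ring,
      PySem.List.slice_natCast]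
    simp only [Int.toNat_natCast, Nat.add_sub_cancel_left]
  · rintro ⟨i, hi, rfl⟩
    refine ⟨(i : Int), ⟨by omega, by omega⟩, ?_⟩
    rw [show ((i : Nat) : Int) + 2 = ((i + 2 : Nat) : Int) by push_cast; ring,
      PySem.List.slice_natCast]
    simp

-- a length-2 list is an infix of g iff it is one of g's bigrams
theorem pvInfix_iff_mem_bigrams (b g : List Char) (hb : b.length = 2) :
    b <:+: g ↔ b ∈ pvBigrams g := by
  rw [pvMem_bigrams_iff]
  constructor
  · rintro ⟨s, t, rfl⟩
    refine ⟨s.length, by simp [hb], ?_⟩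
    rw [show s ++ b ++ t = s ++ (b ++ t) by simp, List.drop_left, List.take_left' hb]
  · rintro ⟨i, hi, rfl⟩
    exact ((g.drop i).take_prefix 2).isInfix.trans (g.drop_suffix i).isInfix

-- the substring test equals membership in g2's bigram list, for bigrams of g1
theorem pvIsIn_eq_contains (b g2L : List Char) (hb : b.length = 2) :
    PySem.Chars.isIn b g2L = (pvBigrams g2L).contains b := by
  rw [Bool.eq_iff_iff, PySem.Chars.isIn_iff_infix, List.contains_eq_mem, decide_eq_true_iff]
  exact pvInfix_iff_mem_bigrams b g2L hb

theorem pvBigram_length (b g : List Char) (h : b ∈ pvBigrams g) : b.length = 2 := by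
  obtain ⟨i, hi, rfl⟩ := (pvMem_bigrams_iff b g).mp h
  simp; omega

-- core counting fact: summing counts of L over a nodup enumeration of L's distinct
-- elements, restricted to those in M, counts L's positions whose element is in M
theorem pvSum_counts_eq_countP (L M : List (List Char)) (u : List (List Char))
    (hu : u.Nodup) (hmem : ∀ x, x ∈ u ↔ x ∈ L) :
    (u.map (fun k => if M.contains k then (L.count k : Int) else 0)).sum
      = ((L.countP (fun b => M.contains b) : Nat) : Int) := by
  rw [← List.sum_toFinset _ hu]
  have hfin : u.toFinset = L.toFinset := by
    ext x; simp [List.mem_toFinset, hmem]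
  rw [hfin]
  have hLf : L.countP (fun b => M.contains b) = (L.filter (fun b => M.contains b)).length := by
    simp [List.countP_eq_length_filter]
  rw [hLf]
  set Lf := L.filter (fun b => M.contains b) with hLfdef
  have h1 : Lf.length = ∑ a ∈ Lf.toFinset, Lf.count a := by
    have h := Multiset.toFinset_sum_count_eq (Lf : Multiset (List Char))
    simp only [Multiset.coe_count, Multiset.coe_card] at h
    rw [show ((↑Lf : Multiset (List Char)).toFinset) = Lf.toFinset from rfl] at h
    rw [← h]
    exact Finset.sum_congr rfl fun x _ => by simp [List.count_eq_countP, beq_eq_decide]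
  have h2 : ∀ a ∈ Lf.toFinset, Lf.count a = L.count a := by
    intro a ha
    rw [List.mem_toFinset, hLfdef, List.mem_filter] at ha
    exact List.count_filter ha.2
  have h3 : Lf.toFinset = L.toFinset.filter (fun b => M.contains b) := by
    ext x; simp [hLfdef]
  rw [h1, Finset.sum_congr rfl h2, h3]
  push_cast
  rw [Finset.sum_filter]

theorem pvA_eq (g1 g2 : String) :
    calc_power_of_closeness g1 g2
      = ((((pvBigrams g1.toList).countP
            (fun b => (pvBigrams g2.toList).contains b) : Nat)) : Int) := by
  simp only [calc_power_of_closeness]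
  rw [pvGetBase_eq_counter, pvGetBase_eq_counter]
  set L := pvBigrams g1.toList
  set M := pvBigrams g2.toList
  have hstep : ∀ (c : Int) (k : List Char),
      (if (PySem.Dict.counter M).contains k then c + (PySem.Dict.counter L).getD k 0 else c)
        = c + (if M.contains k then (L.count k : Int) else 0) := by
    intro c k
    rw [PySem.Dict.contains_counter, PySem.Dict.getD_counter]
    split_ifs <;> simp
  calc (PySem.Dict.counter L).keys.foldl
        (fun c k => if (PySem.Dict.counter M).contains k then c + (PySem.Dict.counter L).getD k 0 else c) 0
      = (PySem.Dict.counter L).keys.foldl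
        (fun c k => c + (if M.contains k then (L.count k : Int) else 0)) 0 := by
        exact PySem.List.foldl_congr_mem _ _ _ _ fun c k _ => hstep c k
    _ = ((PySem.Dict.counter L).keys.map
          (fun k => if M.contains k then (L.count k : Int) else 0)).sum := by
        rw [PySem.List.foldl_add]; simp
    _ = ((L.countP (fun b => M.contains b) : Nat) : Int) := by
        rw [PySem.Dict.keys_counter]
        exact pvSum_counts_eq_countP L M _ (PySem.Set.nodup_ofList L)
          (PySem.Set.mem_ofList L)

theorem pvB_eq (g1 g2 : String) :
    calc_power_of_closeness_alt g1 g2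
      = ((((pvBigrams g1.toList).countP
            (fun b => (pvBigrams g2.toList).contains b) : Nat)) : Int) := by
  simp only [calc_power_of_closeness_alt]
  have hmap : (PySem.List.pyRange 0 ((g1.toList.length : Int) - 1) 1).map
      (fun i => if PySem.Chars.isIn (PySem.List.slice g1.toList (some i) (some (i + 2)))
          g2.toList then (1 : Int) else 0)
      = (pvBigrams g1.toList).map
          (fun b => if PySem.Chars.isIn b g2.toList then (1 : Int) else 0) := by
    rw [pvBigrams, List.map_map]; rfl
  rw [hmap, PySem.List.sum_map_ite_one_zero]
  congr 1
  exact List.countP_congr fun b hb => by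
    rw [pvIsIn_eq_contains b g2.toList (pvBigram_length b g1.toList hb)]

-- ===== VERDICT (by name: the statement is the Claim_ definition above) =====
theorem calc_power_of_closeness_spec : Claim_equal_calc_power_of_closeness := by
  intro g1 g2 _
  unfold Spec_calc_power_of_closeness
  rw [pvA_eq, pvB_eq]
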